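-- pv_equiv track=rewrite | github.com/nobe0716/problem_solving | codeforces/contests/1368/B. Codeforces Subsequences.py | solve
-- ===== SOURCE A (Python) =====
-- TOKEN = 'codeforces'
--
-- def solve(n: int) -> str:
--     v = 1
--     counts = [1] * 10
--     i = 0
--     while v < n:
--         v = v // counts[i] * (counts[i] + 1)
--         counts[i] += 1
--         i = (i + 1) % 10
--
--     return ''.join(TOKEN[_] * counts[_] for _ in range(10))
-- ===== SOURCE B (Python) =====
-- TOKEN = 'codeforces'
--
-- def solve(n: int) -> str:
--     # Closed-form: counts are [base+1]*r + [base]*(10-r) for the largest base with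
--     # base**10 < n and the least r making the product reach n.
--     if n <= 1:
--         counts = [1] * 10
--     else:
--         base = 1
--         while (base + 1) ** 10 < n:
--             base += 1
--         r = 0
--         while r < 10 and (base + 1) ** r * base ** (10 - r) < n:
--             r += 1
--         counts = [base + 1] * r + [base] * (10 - r)
--     return ''.join(TOKEN[i] * counts[i] for i in range(10))
-- ===== Notes on version B (the rewrite author's own statement) =====
-- stated objective: alternative
-- what changed: B computes the final letter counts in closed form (largest base with base**10 < n via a 10th-root search, then the least number r of positions bumped to base+1) instead of simulating A's round-robin increment loop with an incrementally maintained product.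
import Mathlib
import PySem

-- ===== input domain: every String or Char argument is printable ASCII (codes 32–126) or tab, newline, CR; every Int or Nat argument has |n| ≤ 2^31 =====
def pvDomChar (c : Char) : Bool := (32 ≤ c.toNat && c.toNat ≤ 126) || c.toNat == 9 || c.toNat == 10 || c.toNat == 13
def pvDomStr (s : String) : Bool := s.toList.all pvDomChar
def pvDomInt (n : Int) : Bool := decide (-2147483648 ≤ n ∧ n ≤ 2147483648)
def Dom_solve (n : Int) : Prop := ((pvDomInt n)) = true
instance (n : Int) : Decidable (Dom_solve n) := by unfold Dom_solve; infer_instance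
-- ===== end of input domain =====

-- B builds the letter counts in closed form (10th-root search for the base, then the least
-- number of positions bumped to base+1) instead of A's round-robin increment simulation.


-- ===== PORT A =====
def TOKENL : List Char := "codeforces".toList

-- ''.join(TOKEN[i] * counts[i] for i in range(10)) — this line is verbatim the same in both Pythons
def joinCounts (counts : List Int) : String :=
  String.ofList (((PySem.List.pyRange 0 10 1).map (fun j =>
    PySem.List.pyRepeat [PySem.List.pyGetD TOKENL j ' '] (PySem.List.pyGetD counts j 0))).flatten)

-- A's while loop; the fuel only makes it total (n.toNat + 1 steps always suffice: the
-- maintained product starts at 1 and grows by at least 1 per iteration — see the proofs)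
def solveLoop (n : Int) : Nat → Int → List Int → Int → List Int
  | 0, _, counts, _ => counts
  | fuel + 1, v, counts, i =>
    if v < n then
      let c := PySem.List.pyGetD counts i 0
      solveLoop n fuel (PySem.Int.floordiv v c * (c + 1))
        (PySem.List.pySetD counts i (c + 1)) (PySem.Int.mod (i + 1) 10)
    else counts

def solve (n : Int) : String :=
  joinCounts (solveLoop n (n.toNat + 1) 1 (List.replicate 10 1) 0)

-- ===== PORT B =====
-- while (base + 1) ** 10 < n: base += 1
def solveBase (n base : Int) : Int :=
  if (base + 1) ^ 10 < n then solveBase n (base + 1) else base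
termination_by (n - base).toNat
decreasing_by
  have hb : base < n := by
    rcases (by omega : 0 ≤ base ∨ base < 0) with h | h
    · have h1 : (base + 1) ≤ (base + 1) ^ 10 := le_self_pow₀ (by omega) (by norm_num)
      omega
    · have : (0:Int) ≤ (base + 1) ^ 10 := by positivity
      omega
  omega

-- while r < 10 and (base + 1) ** r * base ** (10 - r) < n: r += 1
def solveR (n base : Int) (r : Nat) : Nat :=
  if r < 10 ∧ (base + 1) ^ r * base ^ (10 - r) < n then solveR n base (r + 1) else r
termination_by 10 - r
decreasing_by omega

def solve_alt (n : Int) : String :=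
  joinCounts (if n ≤ 1 then List.replicate 10 1
    else
      let b := solveBase n 1
      let r := solveR n b 0
      List.replicate r (b + 1) ++ List.replicate (10 - r) b)

-- ===== PRECONDITION & SPEC =====
def Spec_solve (n : Int) (out : String) : Prop := out = solve_alt n
instance (n : Int) (out : String) : Decidable (Spec_solve n out) := by unfold Spec_solve; infer_instance

-- ===== CLAIM (what is proved, stated in full; the proofs are below) =====
def Claim_equal_solve : Prop := ∀ (n : Int), Dom_solve n → Spec_solve n (solve n)

-- ===== LEMMAS AND PROOFS =====

-- state of A's loop after k steps: the counts list and the maintained product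
def cfgF (k : Nat) : List Int :=
  (List.range 10).map (fun j => if j < k % 10 then (k / 10 : Nat) + 2 else (k / 10 : Nat) + 1)

def valF (k : Nat) : Int :=
  ((k / 10 : Nat) + 2) ^ (k % 10) * ((k / 10 : Nat) + 1) ^ (10 - k % 10)

theorem valF_lt_succ (k : Nat) : valF k < valF (k + 1) := by
  unfold valF
  rcases Nat.lt_or_ge (k % 10) 9 with h | h
  · rw [show (k+1) / 10 = k / 10 by omega, show (k+1) % 10 = k % 10 + 1 by omega,
       show 10 - k % 10 = (10 - (k % 10 + 1)) + 1 by omega, pow_succ, pow_succ]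
    have hA : (0:Int) < (((k/10 : Nat):Int)+2)^(k % 10) := by positivity
    have hB : (0:Int) < (((k/10 : Nat):Int)+1)^(10 - (k % 10 + 1)) := by positivity
    nlinarith
  · have h9 : k % 10 = 9 := by omega
    rw [show (k+1) / 10 = k / 10 + 1 by omega, show (k+1) % 10 = 0 by omega, h9,
        show (10:Nat) - 9 = 1 by norm_num, show (10:Nat) - 0 = 10 by norm_num,
        Nat.cast_add, Nat.cast_one]
    have hA : (0:Int) < (((k/10 : Nat):Int)+2)^9 := by positivity
    rw [pow_zero, one_mul, pow_one, show ((k/10 : Nat):Int) + 1 + 1 = ((k/10 : Nat):Int) + 2 by ring]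
    nlinarith [pow_succ (((k/10 : Nat):Int)+2) 9]

theorem valF_strictMono : StrictMono valF := strictMono_nat_of_lt_succ valF_lt_succ

theorem valF_ge (k : Nat) : (k : Int) + 1 ≤ valF k := by
  induction k with
  | zero => simp [valF]
  | succ k ih =>
    have h := valF_lt_succ k
    push_cast
    omega

theorem step_get (k : Nat) :
    PySem.List.pyGetD (cfgF k) ((k % 10 : Nat) : Int) 0 = ((k / 10 : Nat) : Int) + 1 := by
  rw [PySem.List.pyGetD_natCast]
  rw [cfgF, List.getD_eq_getElem _ _ (by simp; omega)]
  simp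

theorem step_val (k : Nat) :
    PySem.Int.floordiv (valF k) (((k / 10 : Nat) : Int) + 1) * (((k / 10 : Nat) : Int) + 2)
      = valF (k + 1) := by
  have hsplit : valF k = (((k/10:Nat):Int)+1) *
      ((((k/10:Nat):Int)+2)^(k%10) * (((k/10:Nat):Int)+1)^(9 - k%10)) := by
    unfold valF
    rw [show 10 - k%10 = (9 - k%10)+1 by omega, pow_succ]; ring
  rw [hsplit, PySem.Int.floordiv_eq_ediv_of_pos (by positivity),
      Int.mul_ediv_cancel_left _ (by positivity)]
  unfold valF
  rcases Nat.lt_or_ge (k % 10) 9 with h | h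
  · rw [show (k+1) / 10 = k / 10 by omega, show (k+1) % 10 = k % 10 + 1 by omega,
        show 10 - (k % 10 + 1) = 9 - k % 10 by omega, pow_succ]
    ring
  · have h9 : k % 10 = 9 := by omega
    rw [show (k+1) / 10 = k / 10 + 1 by omega, show (k+1) % 10 = 0 by omega, h9,
        Nat.cast_add, Nat.cast_one,
        show (9:Nat) - 9 = 0 by norm_num, show (10:Nat) - 0 = 10 by norm_num]
    rw [pow_zero, pow_zero, one_mul, mul_one,
        show ((k/10 : Nat):Int) + 1 + 1 = ((k/10 : Nat):Int) + 2 by ring]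
    ring

theorem step_cfg (k : Nat) :
    PySem.List.pySetD (cfgF k) ((k % 10 : Nat) : Int) (((k / 10 : Nat) : Int) + 2)
      = cfgF (k + 1) := by
  rw [PySem.List.pySetD_natCast]
  unfold cfgF
  apply List.ext_getElem
  · simp
  intro j h1 h2
  simp only [List.getElem_set, List.getElem_map, List.getElem_range]
  have hj : j < 10 := by simpa using h1
  rcases Nat.lt_or_ge (k % 10) 9 with h | h
  · rw [show (k+1) / 10 = k / 10 by omega, show (k+1) % 10 = k % 10 + 1 by omega]
    split_ifs <;> push_cast <;> omega
  · rw [show (k+1) / 10 = k / 10 + 1 by omega, show (k+1) % 10 = 0 by omega]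
    split_ifs <;> push_cast <;> omega

theorem step_idx (k : Nat) :
    PySem.Int.mod (((k % 10 : Nat) : Int) + 1) 10 = (((k + 1) % 10 : Nat) : Int) := by
  have h : (((k % 10 : Nat) : Int) + 1) = ((k % 10 + 1 : Nat) : Int) := by push_cast; ring
  rw [h, show ((10:Int)) = ((10:Nat):Int) by norm_num, PySem.Int.mod_natCast]
  congr 1
  omega

-- A's loop, started in state k, stops at the first state m ≥ k whose product reaches n
theorem loopA_eq (n : Int) (fuel : Nat) : ∀ k m : Nat, k ≤ m → m ≤ k + fuel →
    (∀ j, j < m → valF j < n) → n ≤ valF m →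
    solveLoop n fuel (valF k) (cfgF k) ((k % 10 : Nat) : Int) = cfgF m := by
  induction fuel with
  | zero =>
    intro k m h1 h2 _ _
    have h : k = m := by omega
    subst h
    rfl
  | succ fuel ih =>
    intro k m h1 h2 hlt hge
    by_cases hk : k = m
    · subst hk
      rw [solveLoop, if_neg (by omega)]
    · have hklt : valF k < n := hlt k (by omega)
      rw [solveLoop, if_pos hklt]
      simp only [step_get]
      rw [show (((k / 10 : Nat) : Int) + 1 + 1) = ((k / 10 : Nat) : Int) + 2 by ring,
          step_val, step_cfg, step_idx]
      exact ih (k + 1) m (by omega) (by omega) hlt hge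

-- B's base search returns the largest base with base ** 10 < n
theorem baseLoop_spec (n : Int) : ∀ base : Int, 1 ≤ base → base ^ 10 < n →
    1 ≤ solveBase n base ∧ (solveBase n base) ^ 10 < n ∧ n ≤ (solveBase n base + 1) ^ 10 := by
  have H : ∀ f : Nat, ∀ base : Int, (n - base).toNat ≤ f → 1 ≤ base → base ^ 10 < n →
      1 ≤ solveBase n base ∧ (solveBase n base) ^ 10 < n ∧ n ≤ (solveBase n base + 1) ^ 10 := by
    intro f
    induction f with
    | zero =>
      intro base hf h1 h2
      exfalso
      have : base ≤ base ^ 10 := le_self_pow₀ (by omega) (by norm_num)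
      omega
    | succ f ih =>
      intro base hf h1 h2
      rw [solveBase]
      by_cases h : (base + 1) ^ 10 < n
      · rw [if_pos h]
        have hb : base < n := by
          have : base ≤ base ^ 10 := le_self_pow₀ (by omega) (by norm_num)
          omega
        exact ih (base + 1) (by omega) (by omega) h
      · rw [if_neg h]
        exact ⟨h1, h2, by omega⟩
  intro base h1 h2
  exact H (n - base).toNat base le_rfl h1 h2

-- B's r search returns the least r (≤ 10) whose bumped product reaches n
theorem rLoop_spec (n b : Int) (h10 : n ≤ (b + 1) ^ 10) :
    ∀ f r0 : Nat, 10 - r0 ≤ f → r0 ≤ 10 →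
    r0 ≤ solveR n b r0 ∧ solveR n b r0 ≤ 10 ∧
      n ≤ (b + 1) ^ (solveR n b r0) * b ^ (10 - solveR n b r0) ∧
      (r0 < solveR n b r0 →
        (b + 1) ^ (solveR n b r0 - 1) * b ^ (10 - (solveR n b r0 - 1)) < n) := by
  intro f
  induction f with
  | zero =>
    intro r0 hf hr
    have h10' : r0 = 10 := by omega
    rw [solveR, if_neg (by omega)]
    subst h10'
    refine ⟨le_rfl, le_rfl, ?_, by omega⟩
    simpa using h10
  | succ f ih =>
    intro r0 hf hr
    rw [solveR]
    by_cases h : r0 < 10 ∧ (b + 1) ^ r0 * b ^ (10 - r0) < n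
    · rw [if_pos h]
      obtain ⟨hA, hB, hC, hD⟩ := ih (r0 + 1) (by omega) (by omega)
      refine ⟨by omega, hB, hC, fun _ => ?_⟩
      by_cases he : r0 + 1 < solveR n b (r0 + 1)
      · exact hD he
      · have hr1 : solveR n b (r0 + 1) = r0 + 1 := by omega
        rw [hr1]
        simpa using h.2
    · rw [if_neg h]
      rcases (by omega : ¬ r0 < 10 ∨ r0 < 10) with hc | hc
      · have h10'' : r0 = 10 := by omega
        refine ⟨le_rfl, by omega, ?_, by omega⟩
        subst h10''; simpa using h10
      · have hge : n ≤ (b + 1) ^ r0 * b ^ (10 - r0) := by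
          rcases (by tauto : ¬ ((b + 1) ^ r0 * b ^ (10 - r0) < n)) with h'
          omega
        exact ⟨le_rfl, hr, hge, by omega⟩

theorem cfg_split (r : Nat) (hr : r ≤ 10) (x y : Int) :
    (List.range 10).map (fun j => if j < r then x else y)
      = List.replicate r x ++ List.replicate (10 - r) y := by
  interval_cases r <;> simp [List.range_succ, List.replicate]

-- the two counts lists agree
theorem counts_eq (n : Int) :
    solveLoop n (n.toNat + 1) 1 (List.replicate 10 1) 0
      = (if n ≤ 1 then List.replicate 10 1
         else
           let b := solveBase n 1
           let r := solveR n b 0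
           List.replicate r (b + 1) ++ List.replicate (10 - r) b) := by
  have e1 : valF 0 = 1 := by decide
  have e2 : cfgF 0 = List.replicate 10 1 := by decide
  have e3 : ((0 % 10 : Nat) : Int) = 0 := by norm_num
  by_cases hn : n ≤ 1
  · rw [if_pos hn]
    have h := loopA_eq n (n.toNat + 1) 0 0 le_rfl (by omega)
      (fun j hj => absurd hj (by omega)) (by omega)
    rw [e1, e2, e3] at h
    rw [h, ← e2]
  · rw [if_neg hn]
    have hn2 : 2 ≤ n := by omega
    obtain ⟨hb1, hb2, hb3⟩ := baseLoop_spec n 1 le_rfl (by simpa using hn2)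
    set b := solveBase n 1 with hbdef
    obtain ⟨-, hr10, hge, hmin⟩ := rLoop_spec n b hb3 10 0 (by omega) (by omega)
    set r := solveR n b 0 with hrdef
    have hr1 : 1 ≤ r := by
      by_contra h
      have h0 : r = 0 := by omega
      rw [h0] at hge
      simp at hge
      omega
    have hmin' := hmin (by omega)
    have hbt : ((b.toNat : Int)) = b := by omega
    set k' : Nat := 10 * (b.toNat - 1) + r with hk'
    have hbt1 : 1 ≤ b.toNat := by omega
    have hdiv1 : (k' - 1) / 10 = b.toNat - 1 := by omega
    have hmod1 : (k' - 1) % 10 = r - 1 := by omega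
    have hcast : ((b.toNat - 1 : Nat) : Int) = b - 1 := by omega
    have hv1 : valF (k' - 1) = (b + 1) ^ (r - 1) * b ^ (10 - (r - 1)) := by
      unfold valF
      rw [hdiv1, hmod1, hcast]
      ring_nf
    have hvk : valF k' = (b + 1) ^ r * b ^ (10 - r) := by
      unfold valF
      by_cases hrlt : r < 10
      · rw [show k' / 10 = b.toNat - 1 by omega, show k' % 10 = r by omega, hcast]
        ring_nf
      · have hre : r = 10 := by omega
        rw [show k' / 10 = b.toNat by omega, show k' % 10 = 0 by omega, hbt, hre]
        norm_num
    have hck : cfgF k' = List.replicate r (b + 1) ++ List.replicate (10 - r) b := by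
      unfold cfgF
      by_cases hrlt : r < 10
      · rw [show k' / 10 = b.toNat - 1 by omega, show k' % 10 = r by omega, hcast,
            show b - 1 + 2 = b + 1 by ring, show b - 1 + 1 = b by ring]
        exact cfg_split r (by omega) _ _
      · have hre : r = 10 := by omega
        rw [show k' / 10 = b.toNat by omega, show k' % 10 = 0 by omega, hbt, hre]
        have hs := cfg_split 0 (by omega) (b + 2) (b + 1)
        simpa using hs
    have hlt : ∀ j, j < k' → valF j < n := by
      intro j hj
      have hle : valF j ≤ valF (k' - 1) := valF_strictMono.monotone (by omega)
      rw [hv1] at hle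
      omega
    have hfuel : k' ≤ 0 + (n.toNat + 1) := by
      have h1 := valF_ge (k' - 1)
      have h2 := hv1 ▸ hmin'
      omega
    have h := loopA_eq n (n.toNat + 1) 0 k' (by omega) hfuel hlt (hvk ▸ hge)
    rw [e1, e2, e3] at h
    rw [h, hck]

-- ===== VERDICT (by name: the statement is the Claim_ definition above) =====
theorem solve_spec : Claim_equal_solve := by
  intro n _
  unfold Spec_solve solve solve_alt
  rw [counts_eq]
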